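-- pv_equiv track=rewrite | github.com/firesock/advent-of-code | 2021/day17.py | max_y
-- ===== SOURCE A (Python) =====
-- import itertools
--
-- def max_y(area_, x_velocities, y_velocities):
--     (x_start, x_end), (y_start, y_end) = area_
--     total_max_y = 0
--     state_trackers = [(0, (0, 0), (x_v, y_v)) for x_v, y_v in itertools.product(x_velocities, y_velocities)]
--
--     for _step in itertools.count(0):
--         next_trackers = []
--         for max_y, (x_p, y_p), (x_v, y_v) in state_trackers:
--             x2_p = x_p + x_v
--             y2_p = y_p + y_v
--             max_y2 = max(max_y, y2_p)
--             if x_start <= x2_p <= x_end and y_start <= y2_p <= y_end: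
--                 total_max_y = max(total_max_y, max_y2)
--             elif x2_p <= x_end and y2_p > y_start:
--                 if x_v > 0:
--                     x2_v = x_v - 1
--                 elif x_v < 0:
--                     x2_v = x_v + 1
--                 else:
--                     x2_v = x_v
--                 y2_v = y_v - 1
--                 next_trackers.append((max_y2, (x2_p, y2_p), (x2_v, y2_v)))
--         state_trackers = next_trackers
--         if len(state_trackers) == 0:
--             break
--
--     return total_max_y
-- ===== SOURCE B (Python) =====
-- def max_y(area_, x_velocities, y_velocities):
--     (x_start, x_end), (y_start, y_end) = area_
--     total_max_y = 0
--     for x_v0 in x_velocities: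
--         for y_v0 in y_velocities:
--             x_p, y_p, x_v, y_v, run_max = 0, 0, x_v0, y_v0, 0
--             while True:
--                 x_p += x_v
--                 y_p += y_v
--                 run_max = max(run_max, y_p)
--                 if x_start <= x_p <= x_end and y_start <= y_p <= y_end:
--                     total_max_y = max(total_max_y, run_max)
--                     break
--                 if not (x_p <= x_end and y_p > y_start):
--                     break
--                 if x_v > 0:
--                     x_v -= 1
--                 elif x_v < 0:
--                     x_v += 1
--                 y_v -= 1
--     return total_max_y
-- ===== Notes on version B (the rewrite author's own statement) =====
-- stated objective: simpler
-- what changed: Replaced the step-synchronous BFS that rebuilds a whole list of tracker states every step with a plain double loop that simulates each (x_v, y_v) trajectory independently to completion, dropping the tracker list entirely.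
import Mathlib
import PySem

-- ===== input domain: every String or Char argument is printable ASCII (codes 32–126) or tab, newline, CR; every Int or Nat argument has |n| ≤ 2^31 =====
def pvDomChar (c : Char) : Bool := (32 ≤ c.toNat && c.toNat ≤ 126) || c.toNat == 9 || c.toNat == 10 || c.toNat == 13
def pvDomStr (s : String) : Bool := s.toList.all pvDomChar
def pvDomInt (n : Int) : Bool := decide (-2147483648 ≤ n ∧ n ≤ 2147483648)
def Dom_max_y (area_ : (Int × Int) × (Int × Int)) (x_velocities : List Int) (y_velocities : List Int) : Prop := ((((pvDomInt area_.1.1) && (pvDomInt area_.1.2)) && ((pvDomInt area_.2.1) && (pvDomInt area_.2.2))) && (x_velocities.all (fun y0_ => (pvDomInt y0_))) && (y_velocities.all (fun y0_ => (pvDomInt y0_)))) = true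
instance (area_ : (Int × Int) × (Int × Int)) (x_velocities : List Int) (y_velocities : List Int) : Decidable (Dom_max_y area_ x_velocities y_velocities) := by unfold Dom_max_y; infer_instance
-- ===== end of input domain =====

-- B replaces A's step-synchronous BFS over a rebuilt tracker list by a plain double loop
-- simulating each (x_v, y_v) trajectory independently (objective: simpler).

-- ===== PORT A =====

-- termination measure for one trajectory: 2*(y_p - y_start) + (y_v+1)*(y_v+2) drops by 2
-- each surviving step and stays ≥ 2 while the tracker survives
def pvMu (ysS yp yv : Int) : Nat := (2*(yp - ysS) + (yv+1)*(yv+2)).toNat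

def pvMuT (ysS : Int) (t : Int × (Int × Int) × (Int × Int)) : Nat := pvMu ysS t.2.1.2 t.2.2.2

def pvMuL (ysS : Int) (ts : List (Int × (Int × Int) × (Int × Int))) : Nat := (ts.map (pvMuT ysS)).sum

theorem pv_consec_nonneg (n : Int) : 0 ≤ n * (n + 1) := by
  rcases Int.le_total 0 n with h | h
  · exact mul_nonneg h (by omega)
  · rcases Int.le_total n (-1) with h2 | h2
    · have h3 : 0 ≤ (-n) * (-(n + 1)) := mul_nonneg (by omega) (by omega)
      nlinarith
    · have h4 : n = 0 ∨ n = -1 := by omega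
      rcases h4 with rfl | rfl <;> simp

theorem pvMu_step (ysS yp yv : Int) (h : ysS < yp + yv) : pvMu ysS (yp + yv) (yv - 1) < pvMu ysS yp yv := by
  have hc : 0 ≤ yv * (yv + 1) := pv_consec_nonneg yv
  unfold pvMu
  have e1 : (yv - 1 + 1) * (yv - 1 + 2) = yv * (yv + 1) := by ring
  have e2 : (yv + 1) * (yv + 2) = yv * (yv + 1) + 2 * yv + 2 := by ring
  rw [e1, e2]
  generalize yv * (yv + 1) = q at hc ⊢
  omega

-- inner 'for max_y, (x_p, y_p), (x_v, y_v) in state_trackers' loop of A: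
-- threads total, builds next_trackers in order
def pvPass (xs xe ysS ye : Int) : List (Int × (Int × Int) × (Int × Int)) → Int → Int × List (Int × (Int × Int) × (Int × Int))
  | [], total => (total, [])
  | (my, (xp, yp), (xv, yv)) :: ts, total =>
      let x2 := xp + xv
      let y2 := yp + yv
      let my2 := max my y2
      if xs ≤ x2 ∧ x2 ≤ xe ∧ ysS ≤ y2 ∧ y2 ≤ ye then
        pvPass xs xe ysS ye ts (max total my2)
      else if x2 ≤ xe ∧ ysS < y2 then
        ((pvPass xs xe ysS ye ts total).1,
          (my2, (x2, y2), ((if 0 < xv then xv - 1 else if xv < 0 then xv + 1 else xv), yv - 1))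
            :: (pvPass xs xe ysS ye ts total).2)
      else pvPass xs xe ysS ye ts total

theorem pvPass_mu (xs xe ysS ye : Int) (ts : List (Int × (Int × Int) × (Int × Int))) (total : Int) :
    pvMuL ysS (pvPass xs xe ysS ye ts total).2 + (pvPass xs xe ysS ye ts total).2.length ≤ pvMuL ysS ts := by
  induction ts generalizing total with
  | nil => simp [pvPass, pvMuL]
  | cons t ts ih =>
      obtain ⟨my, ⟨xp, yp⟩, xv, yv⟩ := t
      simp only [pvPass]
      split
      · have := ih (max total (max my (yp + yv)))
        simp only [pvMuL, List.map_cons, List.sum_cons] at this ⊢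
        omega
      · split
        · rename_i h1 h2
          have hmu := pvMu_step ysS yp yv h2.2
          have := ih total
          simp only [pvMuL, List.map_cons, List.sum_cons, List.length_cons, pvMuT] at *
          omega
        · have := ih total
          simp only [pvMuL, List.map_cons, List.sum_cons] at this ⊢
          omega

-- A's 'for _step in itertools.count(0)' loop: run a pass, stop when next_trackers is empty
def pvALoop (xs xe ysS ye : Int) (ts : List (Int × (Int × Int) × (Int × Int))) (total : Int) : Int :=
  if _h : (pvPass xs xe ysS ye ts total).2 = [] then (pvPass xs xe ysS ye ts total).1
  else pvALoop xs xe ysS ye (pvPass xs xe ysS ye ts total).2 (pvPass xs xe ysS ye ts total).1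
termination_by pvMuL ysS ts
decreasing_by
  have h1 := pvPass_mu xs xe ysS ye ts total
  have h2 : (pvPass xs xe ysS ye ts total).2.length ≠ 0 := by
    simpa [List.length_eq_zero_iff] using _h
  omega

def max_y (area_ : (Int × Int) × (Int × Int)) (x_velocities : List Int) (y_velocities : List Int) : Int :=
  pvALoop area_.1.1 area_.1.2 area_.2.1 area_.2.2
    (x_velocities.flatMap (fun xv => y_velocities.map (fun yv => ((0 : Int), ((0 : Int), (0 : Int)), (xv, yv))))) 0

-- ===== PORT B =====

-- B's inner 'while True' loop: simulate one trajectory, folding hits into acc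
def pvSimB (xs xe ysS ye xp yp xv yv run acc : Int) : Int :=
  if xs ≤ xp + xv ∧ xp + xv ≤ xe ∧ ysS ≤ yp + yv ∧ yp + yv ≤ ye then max acc (max run (yp + yv))
  else if xp + xv ≤ xe ∧ ysS < yp + yv then
    pvSimB xs xe ysS ye (xp + xv) (yp + yv) (if 0 < xv then xv - 1 else if xv < 0 then xv + 1 else xv) (yv - 1) (max run (yp + yv)) acc
  else acc
termination_by pvMu ysS yp yv
decreasing_by exact pvMu_step ysS yp yv (by omega)

def max_y_alt (area_ : (Int × Int) × (Int × Int)) (x_velocities : List Int) (y_velocities : List Int) : Int :=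
  x_velocities.foldl (fun acc xv =>
    y_velocities.foldl (fun acc2 yv =>
      pvSimB area_.1.1 area_.1.2 area_.2.1 area_.2.2 0 0 xv yv 0 acc2) acc) 0

-- ===== PRECONDITION & SPEC =====
def Spec_max_y (area_ : (Int × Int) × (Int × Int)) (x_velocities : List Int) (y_velocities : List Int) (out : Int) : Prop := out = max_y_alt area_ x_velocities y_velocities
instance (area_ : (Int × Int) × (Int × Int)) (x_velocities : List Int) (y_velocities : List Int) (out : Int) : Decidable (Spec_max_y area_ x_velocities y_velocities out) := by unfold Spec_max_y; infer_instance

-- ===== CLAIM (what is proved, stated in full; the proofs are below) =====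
def Claim_equal_max_y : Prop := ∀ (area_ : (Int × Int) × (Int × Int)) (x_velocities : List Int) (y_velocities : List Int), Dom_max_y area_ x_velocities y_velocities → Spec_max_y area_ x_velocities y_velocities (max_y area_ x_velocities y_velocities)

-- ===== LEMMAS AND PROOFS =====

-- the apex value a single trajectory contributes (some v = it hits the target with running max v)
def pvTraj (xs xe ysS ye xp yp xv yv run : Int) : Option Int :=
  if xs ≤ xp + xv ∧ xp + xv ≤ xe ∧ ysS ≤ yp + yv ∧ yp + yv ≤ ye then some (max run (yp + yv))
  else if xp + xv ≤ xe ∧ ysS < yp + yv then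
    pvTraj xs xe ysS ye (xp + xv) (yp + yv) (if 0 < xv then xv - 1 else if xv < 0 then xv + 1 else xv) (yv - 1) (max run (yp + yv))
  else none
termination_by pvMu ysS yp yv
decreasing_by exact pvMu_step ysS yp yv (by omega)

def pvG (xs xe ysS ye : Int) (acc : Int) (t : Int × (Int × Int) × (Int × Int)) : Int :=
  match pvTraj xs xe ysS ye t.2.1.1 t.2.1.2 t.2.2.1 t.2.2.2 t.1 with
  | some v => max acc v
  | none => acc

theorem pvSimB_eq (xs xe ysS ye xp yp xv yv run acc : Int) :
    pvSimB xs xe ysS ye xp yp xv yv run acc =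
      match pvTraj xs xe ysS ye xp yp xv yv run with
      | some v => max acc v
      | none => acc := by
  have main : ∀ (n : Nat) (xp yp xv yv run acc : Int), pvMu ysS yp yv ≤ n →
      pvSimB xs xe ysS ye xp yp xv yv run acc =
        match pvTraj xs xe ysS ye xp yp xv yv run with
        | some v => max acc v
        | none => acc := by
    intro n
    induction n with
    | zero =>
        intro xp yp xv yv run acc hn
        rw [pvSimB, pvTraj]
        by_cases h1 : xs ≤ xp + xv ∧ xp + xv ≤ xe ∧ ysS ≤ yp + yv ∧ yp + yv ≤ ye
        · rw [if_pos h1, if_pos h1]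
        · by_cases h2 : xp + xv ≤ xe ∧ ysS < yp + yv
          · exact absurd (lt_of_lt_of_le (pvMu_step ysS yp yv h2.2) hn) (by omega)
          · rw [if_neg h1, if_neg h1, if_neg h2, if_neg h2]
    | succ n ih =>
        intro xp yp xv yv run acc hn
        rw [pvSimB, pvTraj]
        by_cases h1 : xs ≤ xp + xv ∧ xp + xv ≤ xe ∧ ysS ≤ yp + yv ∧ yp + yv ≤ ye
        · rw [if_pos h1, if_pos h1]
        · by_cases h2 : xp + xv ≤ xe ∧ ysS < yp + yv
          · rw [if_neg h1, if_neg h1, if_pos h2, if_pos h2]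
            exact ih _ _ _ _ _ _ (by have := pvMu_step ysS yp yv h2.2; omega)
          · rw [if_neg h1, if_neg h1, if_neg h2, if_neg h2]
  exact main (pvMu ysS yp yv) xp yp xv yv run acc le_rfl

theorem pvG_comm (xs xe ysS ye : Int) (a : Int) (t u : Int × (Int × Int) × (Int × Int)) :
    pvG xs xe ysS ye (pvG xs xe ysS ye a t) u = pvG xs xe ysS ye (pvG xs xe ysS ye a u) t := by
  unfold pvG
  rcases pvTraj xs xe ysS ye t.2.1.1 t.2.1.2 t.2.2.1 t.2.2.2 t.1 with _ | v <;>
    rcases pvTraj xs xe ysS ye u.2.1.1 u.2.1.2 u.2.2.1 u.2.2.2 u.1 with _ | w <;>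
      simp [max_comm, max_left_comm]

theorem pvG_foldl_shift (xs xe ysS ye : Int) (l : List (Int × (Int × Int) × (Int × Int)))
    (a : Int) (t : Int × (Int × Int) × (Int × Int)) :
    l.foldl (pvG xs xe ysS ye) (pvG xs xe ysS ye a t) = pvG xs xe ysS ye (l.foldl (pvG xs xe ysS ye) a) t := by
  induction l generalizing a with
  | nil => rfl
  | cons x l ih => simp only [List.foldl_cons, pvG_comm xs xe ysS ye a t x, ih]

theorem pvPass_foldl (xs xe ysS ye : Int) (ts : List (Int × (Int × Int) × (Int × Int))) (total : Int) :
    (pvPass xs xe ysS ye ts total).2.foldl (pvG xs xe ysS ye) (pvPass xs xe ysS ye ts total).1 =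
      ts.foldl (pvG xs xe ysS ye) total := by
  induction ts generalizing total with
  | nil => simp [pvPass]
  | cons t ts ih =>
      obtain ⟨my, ⟨xp, yp⟩, xv, yv⟩ := t
      simp only [pvPass, List.foldl_cons]
      have hg : pvG xs xe ysS ye total (my, (xp, yp), xv, yv) =
          match pvTraj xs xe ysS ye xp yp xv yv my with
          | some v => max total v | none => total := rfl
      split
      · rename_i h1
        rw [ih]
        congr 1
        rw [hg, pvTraj, if_pos h1]
      · split
        · rename_i h1 h2
          simp only [List.foldl_cons]
          rw [pvG_foldl_shift, ih, ← pvG_foldl_shift]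
          congr 1
          rw [hg, pvTraj, if_neg h1, if_pos h2]
          rfl
        · rename_i h1 h2
          rw [ih]
          congr 1
          rw [hg, pvTraj, if_neg h1, if_neg h2]

theorem pvALoop_eq (xs xe ysS ye : Int) (ts : List (Int × (Int × Int) × (Int × Int))) (total : Int) :
    pvALoop xs xe ysS ye ts total = ts.foldl (pvG xs xe ysS ye) total := by
  fun_induction pvALoop xs xe ysS ye ts total with
  | case1 ts total h =>
      have h2 := pvPass_foldl xs xe ysS ye ts total
      rw [h] at h2
      simpa using h2
  | case2 ts total h ih =>
      rw [ih, pvPass_foldl]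

theorem pv_foldl_flatMap {α β γ : Type} (f : α → List β) (g : γ → β → γ) (l : List α) (a : γ) :
    (l.flatMap f).foldl g a = l.foldl (fun a x => (f x).foldl g a) a := by
  induction l generalizing a with
  | nil => rfl
  | cons x l ih => simp [List.flatMap_cons, List.foldl_append, ih]

-- ===== VERDICT (by name: the statement is the Claim_ definition above) =====
theorem max_y_spec : Claim_equal_max_y := by
  intro area_ xvs yvs _
  unfold Spec_max_y max_y max_y_alt
  rw [pvALoop_eq, pv_foldl_flatMap]
  have hfun : (fun (a : Int) (xv : Int) =>
        List.foldl (pvG area_.1.1 area_.1.2 area_.2.1 area_.2.2) a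
          (yvs.map (fun yv => ((0 : Int), ((0 : Int), (0 : Int)), (xv, yv))))) =
      (fun (a : Int) (xv : Int) =>
        List.foldl (fun acc2 yv => pvSimB area_.1.1 area_.1.2 area_.2.1 area_.2.2 0 0 xv yv 0 acc2) a yvs) := by
    funext a xv
    rw [List.foldl_map]
    congr 1
    funext a2 yv
    rw [pvSimB_eq]
    rfl
  rw [hfun]
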